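-- pv_equiv track=rewrite | github.com/kellerberrin/OSM-QSAR | OSMUtility.py | data_text
-- ===== SOURCE A (Python) =====
-- def data_text(value_array, classes):
--
--     class_array = []
--     for x in value_array:
--
--         if x <= classes[0][0]:
--             class_str = classes[0][1]
--         else:
--             class_str = "inactive"
--
--         if len(classes) > 1:
--             for idx in range(len(classes) - 1):
--                 if x > classes[idx][0] and x <= classes[idx + 1][0]:
--                     class_str = classes[idx + 1][1]
--
--         class_array.append(class_str)
--
--     return class_array
-- ===== SOURCE B (Python) =====
-- def _label_of(classes, x):
--     # label of the region containing x: last consecutive pair whose interval covers x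
--     matches = [hi_lab for (lo, _), (hi, hi_lab) in zip(classes, classes[1:]) if lo < x <= hi]
--     if matches:
--         return matches[-1]
--     return classes[0][1] if x <= classes[0][0] else "inactive"
--
--
-- def data_text(value_array, classes):
--     # Sort the distinct thresholds once, precompute the label of each of the
--     # m+1 regions they cut Z into, then binary-search each value's region.
--     ts = sorted({t for t, _ in classes})
--     table = [_label_of(classes, r) for r in (ts + [ts[-1] + 1] if ts else [])]
--     out = []
--     for x in value_array:
--         lo, hi = 0, len(ts)
--         while lo < hi:
--             mid = (lo + hi) // 2
--             if ts[mid] < x: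
--                 lo = mid + 1
--             else:
--                 hi = mid
--         out.append(table[lo])
--     return out
-- ===== Notes on version B (the rewrite author's own statement) =====
-- stated objective: faster
-- what changed: B sorts the distinct thresholds once, precomputes the label of each of the m+1 regions they cut the integers into, and classifies every value by a hand-written binary search into the sorted thresholds, replacing A's per-value linear scan over all consecutive threshold pairs.
import Mathlib
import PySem

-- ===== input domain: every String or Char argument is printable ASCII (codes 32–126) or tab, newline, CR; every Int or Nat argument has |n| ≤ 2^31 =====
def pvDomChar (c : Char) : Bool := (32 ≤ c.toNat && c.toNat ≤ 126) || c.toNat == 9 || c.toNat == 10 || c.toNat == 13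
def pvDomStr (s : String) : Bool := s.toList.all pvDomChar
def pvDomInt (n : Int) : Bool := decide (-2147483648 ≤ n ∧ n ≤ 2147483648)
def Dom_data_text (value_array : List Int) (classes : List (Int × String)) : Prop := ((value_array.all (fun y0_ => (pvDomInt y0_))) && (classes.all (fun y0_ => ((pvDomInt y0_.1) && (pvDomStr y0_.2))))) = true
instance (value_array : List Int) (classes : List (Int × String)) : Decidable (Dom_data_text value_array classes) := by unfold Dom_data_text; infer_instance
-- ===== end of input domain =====

-- B sorts the distinct thresholds once, precomputes the label of each of the m+1 regions they
-- cut Z into, and classifies each value by binary search into the sorted thresholds —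
-- O(m^2 + (n+m) log m) instead of A's O(n*m) per-value scan; measured faster on large inputs.

-- ===== PORT A =====
-- one iteration of A's outer loop: default label, then forward scan overwriting class_str
def classifyA (classes : List (Int × String)) (x : Int) : String :=
  let c0 := classes.headD (0, "")
  let base := if x ≤ c0.1 then c0.2 else "inactive"
  if 1 < classes.length then
    (List.range (classes.length - 1)).foldl
      (fun s idx =>
        let a := classes.getD idx (0, "")
        let b := classes.getD (idx + 1) (0, "")
        if a.1 < x ∧ x ≤ b.1 then b.2 else s) base
  else base

def data_text (value_array : List Int) (classes : List (Int × String)) : List String :=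
  value_array.foldl (fun acc x => acc ++ [classifyA classes x]) []

-- ===== PORT B =====
-- Source B's _label_of: all covering consecutive pairs, last one wins, lazy default
-- (classes[0] is ported with headD: _label_of is only reached with classes ≠ [] under Pre_)
def labelOf (classes : List (Int × String)) (x : Int) : String :=
  let ms := ((classes.zip classes.tail).filter
      (fun p => decide (p.1.1 < x) && decide (x ≤ p.2.1))).map (fun p => p.2.2)
  match ms.getLast? with
  | some s => s
  | none =>
      let c0 := classes.headD (0, "")
      if x ≤ c0.1 then c0.2 else "inactive"

-- Source B's hand-written bisect_left loop (ts[mid]: 0 ≤ mid < hi ≤ len ts always, so getD is exact)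
def bisectL (ts : List Int) (x : Int) (lo hi : Nat) : Nat :=
  if lo < hi then
    let mid := (lo + hi) / 2
    if ts.getD mid 0 < x then bisectL ts x (mid + 1) hi else bisectL ts x lo mid
  else lo
termination_by hi - lo
decreasing_by all_goals omega

def data_text_alt (value_array : List Int) (classes : List (Int × String)) : List String :=
  let ts := PySem.List.sorted (PySem.Set.ofList (classes.map Prod.fst)) (fun t => t)
  let reps := match ts.getLast? with
    | some t => ts ++ [t + 1]
    | none => []
  let table := reps.map (labelOf classes)
  -- table[lo]: lo = bisect result ≤ len ts < len table whenever ts ≠ [], so getD is exact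
  value_array.map (fun x => table.getD (bisectL ts x 0 ts.length) "")

-- ===== PRECONDITION & SPEC =====
-- Pre_ excludes only the inputs where Python A raises IndexError (classes[0] on classes == []
-- with a nonempty value_array); B raises there too.
def Pre_data_text (value_array : List Int) (classes : List (Int × String)) : Prop :=
  value_array = [] ∨ classes ≠ []
instance (value_array : List Int) (classes : List (Int × String)) : Decidable (Pre_data_text value_array classes) := by unfold Pre_data_text; infer_instance

def pvWitness_data_text : List Int × (List (Int × String)) := ([-1, 3, 10], [(0, "strong"), (5, "weak")])

def Spec_data_text (value_array : List Int) (classes : List (Int × String)) (out : List String) : Prop := out = data_text_alt value_array classes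
instance (value_array : List Int) (classes : List (Int × String)) (out : List String) : Decidable (Spec_data_text value_array classes out) := by unfold Spec_data_text; infer_instance

-- ===== CLAIM (what is proved, stated in full; the proofs are below) =====
def Claim_equal_data_text : Prop := ∀ (value_array : List Int) (classes : List (Int × String)), Dom_data_text value_array classes → Pre_data_text value_array classes → Spec_data_text value_array classes (data_text value_array classes)

-- ===== LEMMAS AND PROOFS =====

-- last forward overwrite = first match of the reversed list
theorem foldl_if_eq_reverse_find {α β : Type} (pred : α → Bool) (val : α → β) :
    ∀ (ps : List α) (init : β),
      ps.foldl (fun s p => if pred p then val p else s) init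
        = (ps.reverse.find? pred).elim init val := by
  intro ps
  induction ps with
  | nil => intro init; simp
  | cons p t ih =>
      intro init
      rw [List.foldl_cons, ih, List.reverse_cons, List.find?_append]
      cases h : t.reverse.find? pred with
      | some q => simp
      | none =>
          by_cases hp : pred p = true <;> simp [hp]

-- first match of the reversed list = last element of the filtered list
theorem reverse_find_eq_getLast_filter {α : Type} (pred : α → Bool) (l : List α) :
    l.reverse.find? pred = (l.filter pred).getLast? := by
  rw [List.getLast?_eq_head?_reverse, ← List.filter_reverse, List.head?_filter]

-- folding over indices of a list equals folding over the list
theorem foldl_range_getD {α β : Type} (d : α) (f : β → α → β) :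
    ∀ (ps : List α) (init : β),
      (List.range ps.length).foldl (fun s i => f s (ps.getD i d)) init = ps.foldl f init := by
  intro ps
  induction ps with
  | nil => intro init; simp
  | cons a t ih =>
      intro init
      rw [List.length_cons, List.range_succ_eq_map, List.foldl_cons, List.foldl_map]
      simpa using ih (f init a)

theorem zip_tail_length (classes : List (Int × String)) :
    (classes.zip classes.tail).length = classes.length - 1 := by
  cases classes with
  | nil => simp
  | cons c t => simp only [List.tail_cons, List.length_zip, List.length_cons]; omega

theorem zip_tail_getD (classes : List (Int × String)) (i : Nat)
    (h : i < (classes.zip classes.tail).length) :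
    (classes.zip classes.tail).getD i ((0, ""), (0, ""))
      = (classes.getD i (0, ""), classes.getD (i + 1) (0, "")) := by
  have hlen := zip_tail_length classes
  have h1 : i < classes.length := by omega
  have h2 : i + 1 < classes.length := by omega
  rw [List.getD_eq_getElem _ _ h, List.getD_eq_getElem _ _ h1, List.getD_eq_getElem _ _ h2]
  rw [List.getElem_zip]
  congr 1
  rw [List.getElem_tail]

-- A's per-value computation equals Source B's _label_of
theorem classifyA_eq_labelOf (classes : List (Int × String)) (x : Int) :
    classifyA classes x = labelOf classes x := by
  unfold classifyA labelOf
  set base := if x ≤ (classes.headD (0, "")).1 then (classes.headD (0, "")).2 else "inactive"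
  set pred : (Int × String) × (Int × String) → Bool :=
    fun p => decide (p.1.1 < x) && decide (x ≤ p.2.1) with hpred
  have key :
      (List.range ((classes.zip classes.tail).length)).foldl
        (fun s idx =>
          let a := classes.getD idx (0, "")
          let b := classes.getD (idx + 1) (0, "")
          if a.1 < x ∧ x ≤ b.1 then b.2 else s) base
        = ((classes.zip classes.tail).reverse.find? pred).elim base (fun p => p.2.2) := by
    rw [PySem.List.foldl_congr_mem' _ _
          (g := fun s p =>
            if pred ((classes.zip classes.tail).getD p ((0, ""), (0, ""))) = true
            then ((classes.zip classes.tail).getD p ((0, ""), (0, ""))).2.2 else s)]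
    · rw [foldl_range_getD ((0, ""), (0, ""))
            (f := fun s p => if pred p = true then p.2.2 else s)]
      exact foldl_if_eq_reverse_find pred (fun p => p.2.2) (classes.zip classes.tail) base
    · intro i hi s
      have hi' : i < (classes.zip classes.tail).length := by
        simpa using List.mem_range.mp hi
      rw [zip_tail_getD classes i hi']
      simp only [hpred, Bool.and_eq_true, decide_eq_true_eq]
  have hfm : (((classes.zip classes.tail).filter pred).map (fun p => p.2.2)).getLast?
      = ((classes.zip classes.tail).reverse.find? pred).map (fun p => p.2.2) := by
    rw [List.getLast?_map, reverse_find_eq_getLast_filter]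
  by_cases hlen : 1 < classes.length
  · rw [if_pos hlen, ← zip_tail_length classes, key]
    cases h : (classes.zip classes.tail).reverse.find? pred <;>
      simp [hfm, h, base]
  · rw [if_neg hlen]
    have hz : classes.zip classes.tail = [] := by
      have h1 := zip_tail_length classes
      have : (classes.zip classes.tail).length = 0 := by omega
      exact List.eq_nil_of_length_eq_zero this
    simp [hz, base]

-- _label_of depends on x only through x's position relative to the thresholds of classes
theorem labelOf_congr (classes : List (Int × String)) (hne : classes ≠ []) (x y : Int)
    (h : ∀ t ∈ classes.map Prod.fst, (t < x ↔ t < y)) :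
    labelOf classes x = labelOf classes y := by
  unfold labelOf
  have hmem : ∀ p ∈ classes.zip classes.tail, p.1.1 ∈ classes.map Prod.fst ∧ p.2.1 ∈ classes.map Prod.fst := by
    intro p hp
    have h1 := List.of_mem_zip hp
    exact ⟨List.mem_map_of_mem h1.1,
      List.mem_map_of_mem (List.mem_of_mem_tail h1.2)⟩
  have hfilter : (classes.zip classes.tail).filter (fun p => decide (p.1.1 < x) && decide (x ≤ p.2.1))
      = (classes.zip classes.tail).filter (fun p => decide (p.1.1 < y) && decide (y ≤ p.2.1)) := by
    apply List.filter_congr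
    intro p hp
    obtain ⟨h1, h2⟩ := hmem p hp
    have b1 : decide (p.1.1 < x) = decide (p.1.1 < y) := decide_eq_decide.mpr (h _ h1)
    have b2 : decide (x ≤ p.2.1) = decide (y ≤ p.2.1) := by
      apply decide_eq_decide.mpr
      rw [← not_lt, ← not_lt]
      exact not_congr (h _ h2)
    rw [b1, b2]
  rw [hfilter]
  rcases classes with _ | ⟨c, t⟩
  · exact absurd rfl hne
  · have hc0 : c.1 ∈ ((c :: t).map Prod.fst) := by simp
    have hiff := h _ hc0
    have hb : (x ≤ c.1) ↔ (y ≤ c.1) := by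
      constructor
      · intro hx
        by_contra hy
        have := hiff.mpr (by omega); omega
      · intro hy
        by_contra hx
        have := hiff.mp (by omega); omega
    have hif : (if x ≤ c.1 then c.2 else "inactive") = (if y ≤ c.1 then c.2 else "inactive") :=
      if_congr hb rfl rfl
    cases hms : ((((c :: t).zip (c :: t).tail).filter
        (fun p => decide (p.1.1 < y) && decide (y ≤ p.2.1))).map (fun p => p.2.2)).getLast? with
    | some s => simp only [hms]
    | none => simp only [hms, List.headD_cons, hif]

-- characterisation of countP on a strictly increasing list
theorem countP_char (x : Int) :
    ∀ (ts : List Int), ts.Pairwise (· < ·) →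
      ∀ i (hi : i < ts.length),
        (ts[i] < x ↔ i < ts.countP (fun t => decide (t < x))) := by
  intro ts
  induction ts with
  | nil => intro _ i hi; simp at hi
  | cons a l ih =>
      intro hp i hi
      have hpl := (List.pairwise_cons.mp hp).2
      have hhead := (List.pairwise_cons.mp hp).1
      by_cases ha : a < x
      · have hcount : (a :: l).countP (fun t => decide (t < x))
            = l.countP (fun t => decide (t < x)) + 1 := by
          simp [ha]
        cases i with
        | zero => simpa [hcount] using ha
        | succ j =>
            have hj : j < l.length := by simpa using hi
            have := ih hpl j hj
            simpa [hcount] using this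
      · have hzero : (a :: l).countP (fun t => decide (t < x)) = 0 := by
          rw [List.countP_eq_zero]
          intro t ht
          rcases List.mem_cons.mp ht with rfl | htl
          · simpa using ha
          · have := hhead t htl
            simp only [decide_eq_true_eq]
            omega
        rw [hzero]
        cases i with
        | zero => simpa using ha
        | succ j =>
            have hj : j < l.length := by simpa using hi
            simp only [List.getElem_cons_succ]
            constructor
            · intro hlt
              have := hhead l[j] (List.getElem_mem hj)
              omega
            · omega

-- Source B's binary-search loop computes countP (· < x) on a strictly increasing list
theorem bisectL_eq_countP (ts : List Int) (x : Int) (hp : ts.Pairwise (· < ·)) :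
    ∀ (lo hi : Nat), hi ≤ ts.length →
      lo ≤ ts.countP (fun t => decide (t < x)) →
      ts.countP (fun t => decide (t < x)) ≤ hi →
      bisectL ts x lo hi = ts.countP (fun t => decide (t < x)) := by
  intro lo hi
  induction hfuel : hi - lo using Nat.strong_induction_on generalizing lo hi with
  | _ n ih =>
      intro hhi hlo hk
      rw [bisectL]
      by_cases hlt : lo < hi
      · rw [if_pos hlt]
        have hmid : (lo + hi) / 2 < ts.length := by omega
        have hget : ts.getD ((lo + hi) / 2) 0 = ts[(lo + hi) / 2] :=
          List.getD_eq_getElem _ _ hmid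
        have hchar := countP_char x ts hp ((lo + hi) / 2) hmid
        by_cases hc : ts.getD ((lo + hi) / 2) 0 < x
        · rw [if_pos hc]
          have : (lo + hi) / 2 < ts.countP (fun t => decide (t < x)) := by
            rw [hget] at hc; exact hchar.mp hc
          exact ih (hi - ((lo + hi) / 2 + 1)) (by omega) _ _ rfl hhi (by omega) hk
        · rw [if_neg hc]
          have : ¬ (lo + hi) / 2 < ts.countP (fun t => decide (t < x)) := by
            rw [hget] at hc
            intro hcon
            exact hc (hchar.mpr hcon)
          exact ih ((lo + hi) / 2 - lo) (by omega) _ _ rfl (by omega) hlo (by omega)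
      · rw [if_neg hlt]
        omega

-- the sorted distinct threshold list: strictly increasing, same members as the thresholds
theorem ts_pairwise (classes : List (Int × String)) :
    (PySem.List.sorted (PySem.Set.ofList (classes.map Prod.fst)) (fun t => t)).Pairwise (· < ·) :=
  PySem.List.sorted_ofList_pairwise_lt (classes.map Prod.fst)

theorem mem_ts (classes : List (Int × String)) (t : Int) :
    t ∈ PySem.List.sorted (PySem.Set.ofList (classes.map Prod.fst)) (fun t => t)
      ↔ t ∈ classes.map Prod.fst := by
  rw [PySem.List.mem_sorted, PySem.Set.mem_ofList]

-- per-value agreement of the two programs (classes nonempty)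
theorem per_value_eq (classes : List (Int × String)) (hne : classes ≠ []) (x : Int) :
    classifyA classes x
      = (let ts := PySem.List.sorted (PySem.Set.ofList (classes.map Prod.fst)) (fun t => t)
         let reps := match ts.getLast? with
           | some t => ts ++ [t + 1]
           | none => []
         let table := reps.map (labelOf classes)
         table.getD (bisectL ts x 0 ts.length) "") := by
  set ts := PySem.List.sorted (PySem.Set.ofList (classes.map Prod.fst)) (fun t => t) with hts
  have hpw : ts.Pairwise (· < ·) := ts_pairwise classes
  have htsne : ts ≠ [] := by
    intro hnil
    rcases classes with _ | ⟨c, t⟩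
    · exact hne rfl
    · have : c.1 ∈ ts := (mem_ts _ _).mpr (by simp)
      rw [hnil] at this; simp at this
  set k := ts.countP (fun t => decide (t < x)) with hk
  have hkle : k ≤ ts.length := List.countP_le_length
  have hbs : bisectL ts x 0 ts.length = k :=
    bisectL_eq_countP ts x hpw 0 ts.length le_rfl (by omega) hkle
  have hlen0 : 0 < ts.length := List.length_pos_iff.mpr htsne
  obtain ⟨tl, htl⟩ : ∃ tl, ts.getLast? = some tl :=
    ⟨ts.getLast htsne, List.getLast?_eq_some_getLast htsne⟩
  have hlast_eq : tl = ts[ts.length - 1]'(by omega) := by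
    have := List.getLast?_eq_getElem? (l := ts)
    rw [htl, List.getElem?_eq_getElem (by omega)] at this
    exact Option.some_injective _ this
  simp only [htl]
  -- the representative of region k
  set rep : Int := if h : k < ts.length then ts[k] else tl + 1 with hrep
  have hreps_get : (ts ++ [tl + 1]).getD k "dummy_unused".length = rep := by
    by_cases h : k < ts.length
    · rw [hrep, dif_pos h, List.getD_eq_getElem _ _ (by simp; omega), List.getElem_append_left h]
    · have hkeq : k = ts.length := by omega
      rw [hrep, dif_neg h, List.getD_eq_getElem _ _ (by simp; omega)]
      rw [List.getElem_append_right (by omega)]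
      simp [hkeq]
  -- table lookup: index k is in range, and picks labelOf classes rep
  have htable : ((ts ++ [tl + 1]).map (labelOf classes)).getD k "" = labelOf classes rep := by
    have hkr : k < (ts ++ [tl + 1]).length := by simp; omega
    rw [List.getD_eq_getElem _ _ (by simpa using hkr), List.getElem_map]
    by_cases h : k < ts.length
    · rw [hrep]; simp only [dif_pos h]; congr 1; exact List.getElem_append_left h
    · have hkeq : k = ts.length := by omega
      rw [hrep]; simp only [dif_neg h]; congr 1
      rw [List.getElem_append_right (by omega)]
      simp [hkeq]
  -- x and rep lie in the same region
  have hsame : ∀ t ∈ classes.map Prod.fst, (t < x ↔ t < rep) := by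
    intro t htmem
    have htts : t ∈ ts := (mem_ts _ _).mpr htmem
    rw [hts] at htts
    have htts' : t ∈ ts := htts
    obtain ⟨i, hi, hti⟩ := List.getElem_of_mem htts'
    have hchar := countP_char x ts hpw i hi
    subst hti
    by_cases h : k < ts.length
    · rw [hrep]; simp only [dif_pos h]
      constructor
      · intro hlt
        have hik : i < k := hchar.mp hlt
        exact List.pairwise_iff_getElem.mp hpw i k hi h hik
      · intro hlt
        have hik : i < k := by
          by_contra hcon
          push Not at hcon
          rcases Nat.lt_or_ge k i with hki | hki
          · have := List.pairwise_iff_getElem.mp hpw k i h hi hki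
            omega
          · have : i = k := by omega
            subst this; omega
        exact hchar.mpr hik
    · have hkeq : k = ts.length := by omega
      rw [hrep]; simp only [dif_neg h]
      have hik : i < k := by omega
      have hxi : ts[i] < x := hchar.mpr hik
      have hile : ts[i] ≤ tl := by
        rw [hlast_eq]
        rcases Nat.lt_or_ge i (ts.length - 1) with hlt | hge
        · exact le_of_lt (List.pairwise_iff_getElem.mp hpw i (ts.length - 1) hi (by omega) hlt)
        · have : i = ts.length - 1 := by omega
          subst this; exact le_rfl
      constructor <;> intro <;> omega
  rw [hbs, htable, classifyA_eq_labelOf]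
  exact labelOf_congr classes hne x rep hsame

-- ===== VERDICT (by name: the statement is the Claim_ definition above) =====
theorem data_text_spec : Claim_equal_data_text := by
  intro value_array classes _ hpre
  unfold Spec_data_text data_text data_text_alt
  rw [PySem.List.foldl_append_singleton_eq_map]
  cases value_array with
  | nil => simp
  | cons v vs =>
      have hne : classes ≠ [] := by
        rcases hpre with h | h
        · exact absurd h (by simp)
        · exact h
      exact List.map_congr_left (fun x _ => per_value_eq classes hne x)
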